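-- pv_equiv track=rewrite | github.com/kerncl/leetcode | python/codility/test/test2.py | solution
-- ===== SOURCE A (Python) =====
-- def solution(R,V):
--     if len(R) == 0:
--         return [0,0]
--     if len(R) == 1:
--         return [V[0],0] if R == 'B' else [0,V[0]]
--     # final either 1 is 0
--     init_a = 0  # assume starting is 0 for both
--     init_b = 0
--     curr_a = 0
--     curr_b = 0
--     for r, v in zip(R, V):
--         if r == 'A':
--             curr_a += v
--             curr_b -= v
--         else:
--             curr_a -= v
--             curr_b += v
--
--         # value checking
--         if curr_a < 0:
--             topup = abs(curr_a)
--             init_a += topup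
--             curr_a = 0
--         if curr_b < 0:
--             topup = abs(curr_b)
--             init_b += topup
--             curr_b = 0
--
--
--     return [init_a, init_b]
-- ===== SOURCE B (Python) =====
-- def solution(R, V):
--     # Single pass over a single signed running balance c (+v for 'A', -v otherwise);
--     # the two minimal top-ups are the extremes of c over all prefixes, seeded with 0.
--     c = lo = hi = 0
--     for r, v in zip(R, V):
--         c += v if r == 'A' else -v
--         if c < lo:
--             lo = c
--         if c > hi:
--             hi = c
--     return [-lo, hi]
-- ===== Notes on version B (the rewrite author's own statement) =====
-- stated objective: simpler
-- what changed: Replaces the two clamp-and-reset accumulators plus the length-0/length-1 special cases with one running signed balance whose prefix minimum and maximum (seeded with 0) directly give both top-ups.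
-- intended difference: On single-character R with nonempty V, A's shortcut returns V[0] itself as a top-up (negative when V[0]<0) and classifies any non-'B' character as 'A', contradicting its own loop; B applies the loop semantics uniformly and returns the intended nonnegative top-ups. — e.g. on solution("A", [-1]): A returns [0, -1], B returns [1, 0]
import Mathlib
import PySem

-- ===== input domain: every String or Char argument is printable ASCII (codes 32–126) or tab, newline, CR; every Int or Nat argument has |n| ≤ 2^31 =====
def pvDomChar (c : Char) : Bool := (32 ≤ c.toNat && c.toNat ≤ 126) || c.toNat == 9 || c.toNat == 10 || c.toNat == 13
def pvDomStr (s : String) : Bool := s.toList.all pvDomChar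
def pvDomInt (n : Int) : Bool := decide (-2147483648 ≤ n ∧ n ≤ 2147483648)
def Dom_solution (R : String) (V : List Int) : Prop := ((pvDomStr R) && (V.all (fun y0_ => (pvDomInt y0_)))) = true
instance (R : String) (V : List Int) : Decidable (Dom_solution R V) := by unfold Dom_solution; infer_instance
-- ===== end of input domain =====

-- B is simpler: one running signed balance with seeded prefix extremes replaces A's
-- two clamp-and-reset accumulators and its length-0/length-1 special cases (return value only).

-- ===== PORT A =====
-- the main loop of A: state (init_a, init_b, curr_a, curr_b)
def solutionLoopA : List (Char × Int) → Int → Int → Int → Int → List Int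
  | [], ia, ib, _, _ => [ia, ib]
  | (r, v) :: rest, ia, ib, ca, cb =>
    let ca1 := if r = 'A' then ca + v else ca - v
    let cb1 := if r = 'A' then cb - v else cb + v
    let ia2 := if ca1 < 0 then ia + (-ca1) else ia
    let ca2 := if ca1 < 0 then 0 else ca1
    let ib2 := if cb1 < 0 then ib + (-cb1) else ib
    let cb2 := if cb1 < 0 then 0 else cb1
    solutionLoopA rest ia2 ib2 ca2 cb2

def solution (R : String) (V : List Int) : List Int :=
  if R.toList.length = 0 then [0, 0]
  else if R.toList.length = 1 then
    -- Python's V[0] raises IndexError on empty V: that input is excluded by Pre_solution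
    let v0 := (PySem.List.pyGet? V 0).getD 0
    if R = "B" then [v0, 0] else [0, v0]
  else
    solutionLoopA (R.toList.zip V) 0 0 0 0

-- ===== PORT B =====
-- B's single loop: state (c, lo, hi); returns (lo, hi)
def solutionLoopB : List (Char × Int) → Int → Int → Int → Int × Int
  | [], _, lo, hi => (lo, hi)
  | (r, v) :: rest, c, lo, hi =>
    let c1 := c + (if r = 'A' then v else -v)
    let lo1 := if c1 < lo then c1 else lo
    let hi1 := if c1 > hi then c1 else hi
    solutionLoopB rest c1 lo1 hi1

def solution_alt (R : String) (V : List Int) : List Int :=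
  let p := solutionLoopB (R.toList.zip V) 0 0 0
  [-p.1, p.2]

-- ===== PRECONDITION & SPEC =====
-- Pre_ excludes exactly the inputs where A raises IndexError (len(R)==1 with empty V).
def Pre_solution (R : String) (V : List Int) : Prop := ¬ (R.toList.length = 1 ∧ V = [])
instance (R : String) (V : List Int) : Decidable (Pre_solution R V) := by unfold Pre_solution; infer_instance
def pvWitness_solution : String × List Int := ("AB", [3, -5])

-- On single-character R with nonempty V, A's shortcut returns V[0] itself as a top-up (negative
-- when V[0]<0) and classifies any non-'B' character as 'A', contradicting its own loop; B applies
-- the loop semantics uniformly and returns the intended nonnegative top-ups.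
def D_solution (R : String) (V : List Int) : Prop :=
  R.toList.length = 1 ∧ V ≠ [] ∧
    (if R = "A" ∨ R = "B" then V.headI < 0 else V.headI ≠ 0)
instance (R : String) (V : List Int) : Decidable (D_solution R V) := by unfold D_solution; infer_instance

def Spec_solution (R : String) (V : List Int) (out : List Int) : Prop := ¬ D_solution R V → out = solution_alt R V
instance (R : String) (V : List Int) (out : List Int) : Decidable (Spec_solution R V out) := by unfold Spec_solution; infer_instance

def pvDiffWitness_solution : String × List Int := ("A", [-1])
def pvDiffWitnessOut_solution : (List Int) × (List Int) := ([0, -1], [1, 0])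

-- ===== CLAIM (what is proved, stated in full; the proofs are below) =====
def Claim_unchanged_solution : Prop := ∀ (R : String) (V : List Int), Dom_solution R V → Pre_solution R V → Spec_solution R V (solution R V)
def Claim_changed_solution : Prop := Dom_solution (pvDiffWitness_solution.1) (pvDiffWitness_solution.2) ∧ Pre_solution (pvDiffWitness_solution.1) (pvDiffWitness_solution.2) ∧ D_solution (pvDiffWitness_solution.1) (pvDiffWitness_solution.2) ∧ solution (pvDiffWitness_solution.1) (pvDiffWitness_solution.2) = pvDiffWitnessOut_solution.1 ∧ solution_alt (pvDiffWitness_solution.1) (pvDiffWitness_solution.2) = pvDiffWitnessOut_solution.2 ∧ pvDiffWitnessOut_solution.1 ≠ pvDiffWitnessOut_solution.2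
def Claim_exact_solution : Prop := ∀ (R : String) (V : List Int), Dom_solution R V → Pre_solution R V → D_solution R V → solution R V ≠ solution_alt R V
-- ===== LEMMAS AND PROOFS =====

-- Loop correspondence: A's four-accumulator state is determined by B's (c, lo, hi) state.
lemma loop_rel : ∀ (L : List (Char × Int)) (c lo hi : Int),
    lo ≤ 0 → 0 ≤ hi → lo ≤ c → c ≤ hi →
    solutionLoopA L (-lo) hi (c - lo) (hi - c)
      = [-(solutionLoopB L c lo hi).1, (solutionLoopB L c lo hi).2] := by
  intro L
  induction L with
  | nil => intro c lo hi h1 h2 h3 h4; simp [solutionLoopA, solutionLoopB]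
  | cons p rest ih =>
    obtain ⟨r, v⟩ := p
    intro c lo hi h1 h2 h3 h4
    by_cases hr : r = 'A'
    · simp only [solutionLoopA, solutionLoopB, if_pos hr]
      rcases lt_trichotomy (c + v) lo with h | h | h
      · have e1 : (if c - lo + v < 0 then -lo + -(c - lo + v) else -lo) = -(c + v) := by rw [if_pos (by omega)]; try omega
        have e2 : (if c - lo + v < 0 then (0:Int) else c - lo + v) = (c + v) - (c + v) := by rw [if_pos (by omega)]; try omega
        have e3 : (if hi - c - v < 0 then hi + -(hi - c - v) else hi) = hi := by rw [if_neg (by omega)]; try omega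
        have e4 : (if hi - c - v < 0 then (0:Int) else hi - c - v) = hi - (c + v) := by rw [if_neg (by omega)]; try omega
        rw [e1, e2, e3, e4, if_pos (by omega : c + v < lo), if_neg (by omega : ¬ c + v > hi)]
        exact ih (c + v) (c + v) hi (by omega) (by omega) (by omega) (by omega)
      · have e1 : (if c - lo + v < 0 then -lo + -(c - lo + v) else -lo) = -lo := by rw [if_neg (by omega)]; try omega
        have e2 : (if c - lo + v < 0 then (0:Int) else c - lo + v) = (c + v) - lo := by rw [if_neg (by omega)]; try omega
        have e3 : (if hi - c - v < 0 then hi + -(hi - c - v) else hi) = hi := by rw [if_neg (by omega)]; try omega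
        have e4 : (if hi - c - v < 0 then (0:Int) else hi - c - v) = hi - (c + v) := by rw [if_neg (by omega)]; try omega
        rw [e1, e2, e3, e4, if_neg (by omega : ¬ c + v < lo), if_neg (by omega : ¬ c + v > hi)]
        exact ih (c + v) lo hi (by omega) (by omega) (by omega) (by omega)
      · by_cases hh : c + v > hi
        · have e1 : (if c - lo + v < 0 then -lo + -(c - lo + v) else -lo) = -lo := by rw [if_neg (by omega)]; try omega
          have e2 : (if c - lo + v < 0 then (0:Int) else c - lo + v) = (c + v) - lo := by rw [if_neg (by omega)]; try omega
          have e3 : (if hi - c - v < 0 then hi + -(hi - c - v) else hi) = (c + v) := by rw [if_pos (by omega)]; try omega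
          have e4 : (if hi - c - v < 0 then (0:Int) else hi - c - v) = (c + v) - (c + v) := by rw [if_pos (by omega)]; try omega
          rw [e1, e2, e3, e4, if_neg (by omega : ¬ c + v < lo), if_pos (by omega : c + v > hi)]
          exact ih (c + v) lo (c + v) (by omega) (by omega) (by omega) (by omega)
        · have e1 : (if c - lo + v < 0 then -lo + -(c - lo + v) else -lo) = -lo := by rw [if_neg (by omega)]; try omega
          have e2 : (if c - lo + v < 0 then (0:Int) else c - lo + v) = (c + v) - lo := by rw [if_neg (by omega)]; try omega
          have e3 : (if hi - c - v < 0 then hi + -(hi - c - v) else hi) = hi := by rw [if_neg (by omega)]; try omega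
          have e4 : (if hi - c - v < 0 then (0:Int) else hi - c - v) = hi - (c + v) := by rw [if_neg (by omega)]; try omega
          rw [e1, e2, e3, e4, if_neg (by omega : ¬ c + v < lo), if_neg (by omega : ¬ c + v > hi)]
          exact ih (c + v) lo hi (by omega) (by omega) (by omega) (by omega)
    · simp only [solutionLoopA, solutionLoopB, if_neg hr]
      rcases lt_trichotomy (c - v) lo with h | h | h
      · have e1 : (if c - lo - v < 0 then -lo + -(c - lo - v) else -lo) = -(c - v) := by rw [if_pos (by omega)]; try omega
        have e2 : (if c - lo - v < 0 then (0:Int) else c - lo - v) = (c - v) - (c - v) := by rw [if_pos (by omega)]; try omega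
        have e3 : (if hi - c + v < 0 then hi + -(hi - c + v) else hi) = hi := by rw [if_neg (by omega)]; try omega
        have e4 : (if hi - c + v < 0 then (0:Int) else hi - c + v) = hi - (c - v) := by rw [if_neg (by omega)]; try omega
        have e5 : c + -v = c - v := by ring
        rw [e5]
        rw [e1, e2, e3, e4, if_pos (by omega : c - v < lo), if_neg (by omega : ¬ c - v > hi)]
        exact ih (c - v) (c - v) hi (by omega) (by omega) (by omega) (by omega)
      · have e1 : (if c - lo - v < 0 then -lo + -(c - lo - v) else -lo) = -lo := by rw [if_neg (by omega)]; try omega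
        have e2 : (if c - lo - v < 0 then (0:Int) else c - lo - v) = (c - v) - lo := by rw [if_neg (by omega)]; try omega
        have e3 : (if hi - c + v < 0 then hi + -(hi - c + v) else hi) = hi := by rw [if_neg (by omega)]; try omega
        have e4 : (if hi - c + v < 0 then (0:Int) else hi - c + v) = hi - (c - v) := by rw [if_neg (by omega)]; try omega
        have e5 : c + -v = c - v := by ring
        rw [e5]
        rw [e1, e2, e3, e4, if_neg (by omega : ¬ c - v < lo), if_neg (by omega : ¬ c - v > hi)]
        exact ih (c - v) lo hi (by omega) (by omega) (by omega) (by omega)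
      · by_cases hh : c - v > hi
        · have e1 : (if c - lo - v < 0 then -lo + -(c - lo - v) else -lo) = -lo := by rw [if_neg (by omega)]; try omega
          have e2 : (if c - lo - v < 0 then (0:Int) else c - lo - v) = (c - v) - lo := by rw [if_neg (by omega)]; try omega
          have e3 : (if hi - c + v < 0 then hi + -(hi - c + v) else hi) = (c - v) := by rw [if_pos (by omega)]; try omega
          have e4 : (if hi - c + v < 0 then (0:Int) else hi - c + v) = (c - v) - (c - v) := by rw [if_pos (by omega)]; try omega
          have e5 : c + -v = c - v := by ring
          rw [e5]
          rw [e1, e2, e3, e4, if_neg (by omega : ¬ c - v < lo), if_pos (by omega : c - v > hi)]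
          exact ih (c - v) lo (c - v) (by omega) (by omega) (by omega) (by omega)
        · have e1 : (if c - lo - v < 0 then -lo + -(c - lo - v) else -lo) = -lo := by rw [if_neg (by omega)]; try omega
          have e2 : (if c - lo - v < 0 then (0:Int) else c - lo - v) = (c - v) - lo := by rw [if_neg (by omega)]; try omega
          have e3 : (if hi - c + v < 0 then hi + -(hi - c + v) else hi) = hi := by rw [if_neg (by omega)]; try omega
          have e4 : (if hi - c + v < 0 then (0:Int) else hi - c + v) = hi - (c - v) := by rw [if_neg (by omega)]; try omega
          have e5 : c + -v = c - v := by ring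
          rw [e5]
          rw [e1, e2, e3, e4, if_neg (by omega : ¬ c - v < lo), if_neg (by omega : ¬ c - v > hi)]
          exact ih (c - v) lo hi (by omega) (by omega) (by omega) (by omega)

lemma loop_main (L : List (Char × Int)) :
    solutionLoopA L 0 0 0 0 = [-(solutionLoopB L 0 0 0).1, (solutionLoopB L 0 0 0).2] := by
  have h := loop_rel L 0 0 0 le_rfl le_rfl le_rfl le_rfl
  simpa using h

-- B's value on a one-pair zip, fully computed
lemma alt_single (R : String) (ch : Char) (v : Int) (rest : List Int)
    (hR : R.toList = [ch]) :
    solution_alt R (v :: rest)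
      = [-(min 0 (if ch = 'A' then v else -v)), max 0 (if ch = 'A' then v else -v)] := by
  simp only [solution_alt, hR, List.zip, List.zipWith, solutionLoopB]
  by_cases hc : ch = 'A' <;> simp [hc] <;> omega

-- A's value on a single-character R with nonempty V
lemma a_single (R : String) (ch : Char) (v : Int) (rest : List Int)
    (hR : R.toList = [ch]) :
    solution R (v :: rest) = if R = "B" then [v, 0] else [0, v] := by
  have c0 : ¬ R.toList.length = 0 := by rw [hR]; simp
  have c1 : R.toList.length = 1 := by rw [hR]; rfl
  rw [solution, if_neg c0, if_pos c1]
  simp [PySem.List.pyGet?, PySem.List.pyIdx?]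

-- ===== VERDICT (by name: the statement is the Claim_ definition above) =====
theorem solution_spec : Claim_unchanged_solution := by
  intro R V _ hpre hnd
  rcases hL : R.toList with _ | ⟨ch, tl⟩
  · -- empty R
    simp [solution, solution_alt, hL, List.zip, solutionLoopB]
  · rcases tl with _ | ⟨ch2, tl2⟩
    · -- length 1
      rcases V with _ | ⟨v, rest⟩
      · exact absurd ⟨by simp [hL], rfl⟩ hpre
      · have hlen : R.toList.length = 1 := by rw [hL]; rfl
        rw [alt_single R ch v rest hL, a_single R ch v rest hL]
        by_cases hAB : R = "A" ∨ R = "B"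
        · have hv : 0 ≤ v := by
            by_contra hneg
            exact hnd ⟨hlen, by simp, by rw [if_pos hAB]; simpa using by omega⟩
          rcases hAB with hA | hB
          · have hch : ch = 'A' := by
              have := congrArg String.toList hA; rw [hL] at this
              simpa using this
            have hRB : R ≠ "B" := by rw [hA]; decide
            rw [if_neg hRB, hch, if_pos rfl]
            simp only [List.cons.injEq, and_true]
            omega
          · have hch : ch = 'B' := by
              have := congrArg String.toList hB; rw [hL] at this
              simpa using this
            rw [if_pos hB, hch, if_neg (by decide : ¬ ('B' : Char) = 'A')]
            simp only [List.cons.injEq, and_true]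
            omega
        · have hv : v = 0 := by
            by_contra hne
            exact hnd ⟨hlen, by simp, by rw [if_neg hAB]; simpa using hne⟩
          have hRB : R ≠ "B" := fun h => hAB (Or.inr h)
          rw [if_neg hRB, hv]
          by_cases hc : ch = 'A' <;> simp [hc]
    · -- length ≥ 2
      have c0 : ¬ R.toList.length = 0 := by rw [hL]; simp
      have c1 : ¬ R.toList.length = 1 := by rw [hL]; simp
      rw [solution, if_neg c0, if_neg c1, solution_alt]
      exact loop_main _

theorem solution_changed : Claim_changed_solution := by
  unfold Claim_changed_solution; decide

theorem solution_tight : Claim_exact_solution := by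
  intro R V _ _ hd heq
  obtain ⟨hlen, hV, hcond⟩ := hd
  rcases hL : R.toList with _ | ⟨ch, tl⟩
  · rw [hL] at hlen; simp at hlen
  · rcases tl with _ | ⟨ch2, tl2⟩
    · rcases V with _ | ⟨v, rest⟩
      · exact hV rfl
      · rw [alt_single R ch v rest hL, a_single R ch v rest hL] at heq
        by_cases hAB : R = "A" ∨ R = "B"
        · have hv : v < 0 := by rw [if_pos hAB] at hcond; simpa using hcond
          rcases hAB with hA | hB
          · have hch : ch = 'A' := by
              have := congrArg String.toList hA; rw [hL] at this
              simpa using this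
            have hRB : R ≠ "B" := by rw [hA]; decide
            rw [if_neg hRB, hch, if_pos rfl] at heq
            simp only [List.cons.injEq, and_true] at heq
            omega
          · have hch : ch = 'B' := by
              have := congrArg String.toList hB; rw [hL] at this
              simpa using this
            rw [if_pos hB, hch, if_neg (by decide : ¬ ('B' : Char) = 'A')] at heq
            simp only [List.cons.injEq, and_true] at heq
            omega
        · have hv : v ≠ 0 := by rw [if_neg hAB] at hcond; simpa using hcond
          have hRB : R ≠ "B" := fun h => hAB (Or.inr h)
          rw [if_neg hRB] at heq
          by_cases hc : ch = 'A'
          · refine hAB (Or.inl ?_)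
            apply String.toList_inj.mp; rw [hL, hc]; decide
          · rw [if_neg hc] at heq
            simp only [List.cons.injEq, and_true] at heq
            omega
    · rw [hL] at hlen; simp at hlen
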